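-- pv_equiv track=rewrite | github.com/tanaypriyansh12/assigment- | main.py | get_all_decodings
-- ===== SOURCE A (Python) =====
-- def get_all_decodings(cipher_text):
--     # Mapping based on Alice's specific rules
--     morse_rules = {
--         "._": "A", "_...": "B", "_._.": "C", "_..": "D", ".": "E",
--         ".._.": "F", "__.": "G", "....": "H", "..": "I", ".---": "J",
--         "_._": "K", "._..": "L", "__": "M", "_.": "N", "___": "O",
--         ".__.": "P", "__._": "Q", ".-.": "R", "...": "S", "_": "T",
--         ".._": "U", "..._": "V", ".__": "W", "_.._": "X", "_.__": "Y",
--         "__..": "Z"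
--     }
--
--     results = []
--
--     def solve(remaining, path):
--         if not remaining:
--             results.append(path)
--             return
--
--         # Check segments from length 1 to 4
--         for i in range(1, 5):
--             if i <= len(remaining):
--                 segment = remaining[:i]
--                 if segment in morse_rules:
--                     solve(remaining[i:], path + morse_rules[segment])
--
--     solve(cipher_text, "")
--     return sorted(results)
-- ===== SOURCE B (Python) =====
-- def get_all_decodings(cipher_text):
--     morse_rules = {
--         "._": "A", "_...": "B", "_._.": "C", "_..": "D", ".": "E",
--         ".._.": "F", "__.": "G", "....": "H", "..": "I", ".---": "J",
--         "_._": "K", "._..": "L", "__": "M", "_.": "N", "___": "O",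
--         ".__.": "P", "__._": "Q", ".-.": "R", "...": "S", "_": "T",
--         ".._": "U", "..._": "V", ".__": "W", "_.._": "X", "_.__": "Y",
--         "__..": "Z"
--     }
--     n = len(cipher_text)
--     # bottom-up DP over suffix positions: dp[i] = all decodings of cipher_text[i:]
--     dp = [None] * (n + 1)
--     dp[n] = [""]
--     for i in range(n - 1, -1, -1):
--         row = []
--         for L in range(1, 5):
--             seg = cipher_text[i:i + L]
--             if len(seg) == L and seg in morse_rules:
--                 letter = morse_rules[seg]
--                 row.extend(letter + tail for tail in dp[i + L])
--         dp[i] = row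
--     return sorted(dp[0])
-- ===== Notes on version B (the rewrite author's own statement) =====
-- stated objective: alternative
-- what changed: Replaces the top-down exhaustive recursion accumulating a path string into a shared results list with an iterative bottom-up DP table dp[i] of all decodings of each suffix, built from position n down to 0 and read off at dp[0]; it trades A's early pruning on undecodable prefixes for sharing each suffix's decoding list among all prefixes.
import Mathlib
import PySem

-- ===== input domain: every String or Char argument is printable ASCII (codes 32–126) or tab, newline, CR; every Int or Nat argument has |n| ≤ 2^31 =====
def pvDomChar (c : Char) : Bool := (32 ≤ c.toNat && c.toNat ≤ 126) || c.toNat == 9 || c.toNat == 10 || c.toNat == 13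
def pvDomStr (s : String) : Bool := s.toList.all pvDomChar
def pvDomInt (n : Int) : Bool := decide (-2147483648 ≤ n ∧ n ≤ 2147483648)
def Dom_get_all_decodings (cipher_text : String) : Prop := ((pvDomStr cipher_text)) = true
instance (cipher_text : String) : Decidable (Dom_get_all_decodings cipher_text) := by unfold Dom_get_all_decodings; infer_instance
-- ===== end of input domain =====

-- B replaces A's top-down exhaustive recursion by a bottom-up table of suffix decodings
-- (each suffix's decoding list computed once and shared); return value proved identical.

-- ===== PORT A =====
-- Alice's fixed Morse-like rules (the literal dict both Pythons contain)
def pvMorse : PySem.Dict String String := PySem.Dict.ofList [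
  ("._", "A"), ("_...", "B"), ("_._.", "C"), ("_..", "D"), (".", "E"),
  (".._.", "F"), ("__.", "G"), ("....", "H"), ("..", "I"), (".---", "J"),
  ("_._", "K"), ("._..", "L"), ("__", "M"), ("_.", "N"), ("___", "O"),
  (".__.", "P"), ("__._", "Q"), (".-.", "R"), ("...", "S"), ("_", "T"),
  (".._", "U"), ("..._", "V"), (".__", "W"), ("_.._", "X"), ("_.__", "Y"),
  ("__..", "Z")]

-- A's inner `solve(remaining, path)` with the `results` accumulator threaded through,
-- and its `for i in range(1, 5)` loop as `pvLoopA` over the literal index list [1,2,3,4].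
mutual
def pvSolveA (remaining : List Char) (path : String) (results : List String) : List String :=
  if remaining.isEmpty then results ++ [path]
  else pvLoopA [1, 2, 3, 4] remaining path results
termination_by (remaining.length, 1, 0)

def pvLoopA (is : List Nat) (remaining : List Char) (path : String) (results : List String) : List String :=
  match is with
  | [] => results
  | 0 :: rest => pvLoopA rest remaining path results   -- unreachable: the index list is [1,2,3,4]
  | (i+1) :: rest =>
      let results' :=
        if h : i + 1 ≤ remaining.length then
          let segment := remaining.take (i+1)
          match PySem.Dict.get? pvMorse (String.ofList segment) with
          | some v => pvSolveA (remaining.drop (i+1)) (path ++ v) results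
          | none => results
        else results
      pvLoopA rest remaining path results'
termination_by (remaining.length, 0, is.length)
decreasing_by all_goals (simp_all [Prod.lex_iff, List.length_drop] <;> omega)
end

def get_all_decodings (cipher_text : String) : List String :=
  PySem.List.sorted (pvSolveA cipher_text.toList "" []) (fun x => x) false

-- ===== PORT B =====
-- B's dp loop `for i in range(n-1, -1, -1)` maintained as a table whose head is dp[i]:
-- each step prepends the row for position i, computed from the rows dp[i+1..n] already built.
def pvRow (s : List Char) (tbl : List (List String)) : List String :=
  ([1, 2, 3, 4].map fun L =>
    if L ≤ s.length then
      match PySem.Dict.get? pvMorse (String.ofList (s.take L)) with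
      | some v => (tbl.getD (L - 1) []).map (fun tail => v ++ tail)
      | none => []
    else []).flatten

def pvTable : List Char → List (List String)
  | [] => [[""]]
  | c :: rest =>
      let tbl := pvTable rest
      pvRow (c :: rest) tbl :: tbl

def get_all_decodings_alt (cipher_text : String) : List String :=
  PySem.List.sorted ((pvTable cipher_text.toList).headD []) (fun x => x) false

-- ===== PRECONDITION & SPEC =====
def Spec_get_all_decodings (cipher_text : String) (out : List String) : Prop := out = get_all_decodings_alt cipher_text
instance (cipher_text : String) (out : List String) : Decidable (Spec_get_all_decodings cipher_text out) := by unfold Spec_get_all_decodings; infer_instance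

-- ===== CLAIM (what is proved, stated in full; the proofs are below) =====
def Claim_equal_get_all_decodings : Prop := ∀ (cipher_text : String), Dom_get_all_decodings cipher_text → Spec_get_all_decodings cipher_text (get_all_decodings cipher_text)

-- ===== LEMMAS AND PROOFS =====

-- the common mathematical object: the list of decodings of a suffix, in A's enumeration order
def pvDec : List Char → List String
  | [] => [""]
  | c :: rest =>
      (if 1 ≤ (c :: rest).length then
        match PySem.Dict.get? pvMorse (String.ofList ((c :: rest).take 1)) with
        | some v => (pvDec rest).map (fun t => v ++ t) | none => []
       else [])
   ++ (if 2 ≤ (c :: rest).length then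
        match PySem.Dict.get? pvMorse (String.ofList ((c :: rest).take 2)) with
        | some v => (pvDec (rest.drop 1)).map (fun t => v ++ t) | none => []
       else [])
   ++ (if 3 ≤ (c :: rest).length then
        match PySem.Dict.get? pvMorse (String.ofList ((c :: rest).take 3)) with
        | some v => (pvDec (rest.drop 2)).map (fun t => v ++ t) | none => []
       else [])
   ++ (if 4 ≤ (c :: rest).length then
        match PySem.Dict.get? pvMorse (String.ofList ((c :: rest).take 4)) with
        | some v => (pvDec (rest.drop 3)).map (fun t => v ++ t) | none => []
       else [])
termination_by s => s.length
decreasing_by all_goals simp [List.length_drop]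

-- the body of one iteration of A's segment loop, phrased on the suffix
def pvStep (rem : List Char) (j : Nat) : List String :=
  if j + 1 ≤ rem.length then
    match PySem.Dict.get? pvMorse (String.ofList (rem.take (j+1))) with
    | some v => (pvDec (rem.drop (j+1))).map (fun t => v ++ t)
    | none => []
  else []

theorem pvLoopA_eq (remaining : List Char) (path : String)
    (hsolve : ∀ r p res, r.length < remaining.length →
      pvSolveA r p res = res ++ (pvDec r).map (fun t => p ++ t)) :
    ∀ (is : List Nat) (results : List String), (∀ i ∈ is, 1 ≤ i) →
      pvLoopA is remaining path results
        = results ++ (is.map (fun i => (pvStep remaining (i-1)).map (fun t => path ++ t))).flatten := by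
  intro is
  induction is with
  | nil => intro results _; simp [pvLoopA]
  | cons i rest ih =>
    intro results hpos
    obtain ⟨j, rfl⟩ : ∃ j, i = j + 1 := by
      have := hpos i (by simp); exact ⟨i - 1, by omega⟩
    rw [pvLoopA]
    rw [ih _ (fun x hx => hpos x (by simp [hx]))]
    simp only [List.map_cons, List.flatten_cons, Nat.add_sub_cancel, ← List.append_assoc]
    congr 1
    simp only [pvStep]
    split_ifs with h
    · cases hg : PySem.Dict.get? pvMorse (String.ofList (remaining.take (j+1))) with
      | none => simp
      | some v =>
        have hlt : (remaining.drop (j+1)).length < remaining.length := by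
          simp [List.length_drop]; omega
        simp [hsolve _ _ _ hlt, List.map_map, Function.comp, String.append_assoc]
    · simp

theorem pvSolveA_eq (remaining : List Char) (path : String) (results : List String) :
    pvSolveA remaining path results = results ++ (pvDec remaining).map (fun t => path ++ t) := by
  induction hn : remaining.length using Nat.strong_induction_on generalizing remaining path results with
  | _ n ih =>
  subst hn
  match remaining with
  | [] => simp [pvSolveA, pvDec]
  | c :: rest =>
    rw [pvSolveA]
    simp only [List.isEmpty_cons, if_neg (by simp : ¬ (false = true))]
    rw [pvLoopA_eq (c :: rest) path
        (fun r p res hlt => ih r.length hlt r p res rfl)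
        [1,2,3,4] results (by decide)]
    congr 1
    simp only [List.map_cons, List.map_nil, List.flatten_cons, List.flatten_nil, List.append_nil]
    rw [pvDec]
    simp [pvStep, List.map_append, apply_ite (List.map (fun t => path ++ t))]

theorem pvTable_get (cs : List Char) :
    ∀ k, (pvTable cs).getD k [] = if k ≤ cs.length then pvDec (cs.drop k) else [] := by
  induction cs with
  | nil => intro k; cases k <;> simp [pvTable, pvDec]
  | cons c rest ih =>
    intro k
    cases k with
    | succ k =>
      simp only [pvTable, List.getD_cons_succ, ih k, List.length_cons, List.drop_succ_cons]
      congr 1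
      all_goals simp
    | zero =>
      simp only [pvTable, List.getD_cons_zero]
      rw [if_pos (Nat.zero_le _), List.drop_zero, pvRow, pvDec]
      simp only [List.map_cons, List.map_nil, List.flatten_cons, List.flatten_nil,
                 List.append_nil]
      have hL : ∀ L : Nat, 1 ≤ L → L ≤ (c :: rest).length →
          (pvTable rest).getD (L - 1) [] = pvDec (rest.drop (L - 1)) := by
        intro L h1 h2
        rw [ih (L-1), if_pos (by simp at h2 ⊢; omega)]
      have g : ∀ L : Nat, 1 ≤ L →
          (if L ≤ (c :: rest).length then
            match PySem.Dict.get? pvMorse (String.ofList ((c :: rest).take L)) with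
            | some v => ((pvTable rest).getD (L-1) []).map (fun tail => v ++ tail)
            | none => []
           else [])
          = (if L ≤ (c :: rest).length then
            match PySem.Dict.get? pvMorse (String.ofList ((c :: rest).take L)) with
            | some v => (pvDec (rest.drop (L-1))).map (fun t => v ++ t)
            | none => []
           else []) := by
        intro L h1
        by_cases h : L ≤ (c :: rest).length
        · rw [if_pos h, if_pos h, hL L h1 h]
        · rw [if_neg h, if_neg h]
      have g1 := g 1 (by omega)
      have g2 := g 2 (by omega)
      have g3 := g 3 (by omega)
      have g4 := g 4 (by omega)
      simp only [show (1-1:Nat) = 0 from rfl, List.drop_zero] at g1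
      simp only [show (2-1:Nat) = 1 from rfl] at g2
      simp only [show (3-1:Nat) = 2 from rfl] at g3
      simp only [show (4-1:Nat) = 3 from rfl] at g4
      rw [g1, g2, g3, g4]
      simp [List.append_assoc]

-- ===== VERDICT (by name: the statement is the Claim_ definition above) =====
theorem get_all_decodings_spec : Claim_equal_get_all_decodings := by
  intro s _
  unfold Spec_get_all_decodings get_all_decodings get_all_decodings_alt
  have hA := pvSolveA_eq s.toList "" []
  have hB := pvTable_get s.toList 0
  have hh : (pvTable s.toList).headD [] = (pvTable s.toList).getD 0 [] := by
    cases pvTable s.toList <;> simp [List.getD]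
  simp at hB
  rw [hA, hh, List.getD_eq_getElem?_getD, hB]
  simp
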